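-- pv_equiv track=rewrite | github.com/authorofnaught/uhhmm_NER | util.py | convert_indices
-- ===== SOURCE A (Python) =====
-- def convert_indices(token_ids, entity_token_onsets, entity_token_offsets):
--     onsets = []
--     offsets = []
--     ind = 0
--
--     for token_ind,token_id in enumerate(token_ids):
--         if len(onsets) == len(offsets):
--             ## Look for start of entity
--             if entity_token_onsets[ind] == token_id:
--                 onsets.append(token_ind)
--
--         ## don't do an else -- even if we just created the start we could see an end on the
--         ## same token. Need to check length again.
--         if len(onsets) != len(offsets):
--             ## we've started an entity but haven't finished it: look for the end.
--             if entity_token_offsets[ind] == token_id: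
--                 offsets.append(token_ind)
--                 ind += 1
--
--         if ind >= len(entity_token_onsets):
--             break
--
--     return onsets, offsets
-- ===== SOURCE B (Python) =====
-- def convert_indices(token_ids, entity_token_onsets, entity_token_offsets):
--     onsets = []
--     offsets = []
--     p = 0
--     n = len(token_ids)
--     for i, onset_id in enumerate(entity_token_onsets):
--         while p < n and token_ids[p] != onset_id:
--             p += 1
--         if p == n:
--             break
--         onsets.append(p)
--         offset_id = entity_token_offsets[i]
--         while p < n and token_ids[p] != offset_id:
--             p += 1
--         if p == n:
--             break
--         offsets.append(p)
--         p += 1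
--     return onsets, offsets
-- ===== Notes on version B (the rewrite author's own statement) =====
-- stated objective: alternative
-- what changed: Inverted the loop nesting: B iterates over entities with a single forward token pointer (while-advance to the onset, then from the same token to the offset), instead of A's single token loop carrying list-length bookkeeping and an entity pointer.
-- outside the precondition, e.g. on convert_indices([1], [5], []): A returns ([], []), B returns ([], []); on convert_indices([1, 2], [1, 3], [2]): A returns ([0], [1]), B returns ([0], [1])
-- crash fix: When token_ids is non-empty and entity_token_onsets is empty, A raises IndexError on its very first iteration while B returns ([], []). — e.g. on convert_indices([1], [], []): A raises IndexError, B returns ([], [])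
import Mathlib
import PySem

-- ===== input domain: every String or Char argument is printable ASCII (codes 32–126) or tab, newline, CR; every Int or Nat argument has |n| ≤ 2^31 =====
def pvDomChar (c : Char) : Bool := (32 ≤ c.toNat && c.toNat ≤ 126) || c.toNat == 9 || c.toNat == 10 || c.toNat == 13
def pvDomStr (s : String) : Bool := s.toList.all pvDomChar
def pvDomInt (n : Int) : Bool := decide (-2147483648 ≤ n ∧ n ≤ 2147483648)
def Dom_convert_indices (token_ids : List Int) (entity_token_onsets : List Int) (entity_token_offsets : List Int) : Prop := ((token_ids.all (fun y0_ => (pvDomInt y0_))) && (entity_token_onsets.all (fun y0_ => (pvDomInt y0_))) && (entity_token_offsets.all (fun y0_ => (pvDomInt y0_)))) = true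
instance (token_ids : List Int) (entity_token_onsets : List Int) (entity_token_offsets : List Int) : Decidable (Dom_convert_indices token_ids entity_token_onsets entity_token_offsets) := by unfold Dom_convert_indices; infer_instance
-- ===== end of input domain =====

-- B inverts the loop nesting (entity-outer with one forward token pointer instead of A's
-- token-outer loop with length bookkeeping); alternative decomposition, same cost.


-- ===== PORT A =====
-- One iteration of A's token loop, as structural recursion over enumerate(token_ids).
-- Where Python raises IndexError (pyGet? = none) the port stops with the current state;
-- those inputs are excluded by Pre_convert_indices.
def pvGoA (eon eoff : List Int) : List (Int × Int) → List Int → List Int → Int → List Int × List Int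
  | [], onsets, offsets, _ => (onsets, offsets)
  | (tind, tid) :: rest, onsets, offsets, ind =>
    match (if onsets.length = offsets.length then
             (PySem.List.pyGet? eon ind).map (fun v => if v = tid then onsets ++ [tind] else onsets)
           else some onsets) with
    | none => (onsets, offsets)  -- Python: IndexError; outside Pre_
    | some onsets1 =>
      match (if onsets1.length ≠ offsets.length then
               (PySem.List.pyGet? eoff ind).map
                 (fun w => if w = tid then (offsets ++ [tind], ind + 1) else (offsets, ind))
             else some (offsets, ind)) with
      | none => (onsets1, offsets)  -- Python: IndexError; outside Pre_
      | some (offsets1, ind1) =>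
        if ind1 ≥ (eon.length : Int) then (onsets1, offsets1)
        else pvGoA eon eoff rest onsets1 offsets1 ind1

def convert_indices (token_ids : List Int) (entity_token_onsets : List Int) (entity_token_offsets : List Int) : List Int × List Int :=
  pvGoA entity_token_onsets entity_token_offsets (PySem.List.enumerate token_ids 0) [] [] 0

-- ===== PORT B =====
-- B's inner 'while p < n and token_ids[p] != target: p += 1'
def pvAdvance (token_ids : List Int) (target : Int) (p : Nat) : Nat :=
  if h : p < token_ids.length then
    if token_ids[p] = target then p else pvAdvance token_ids target (p + 1)
  else p
termination_by token_ids.length - p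

-- B's outer loop over enumerate(entity_token_onsets), carrying the token pointer p.
def pvGoB (token_ids eoff : List Int) : List Int → Nat → Nat → List Int → List Int → List Int × List Int
  | [], _, _, onsets, offsets => (onsets, offsets)
  | onset_id :: rest, i, p, onsets, offsets =>
    let p1 := pvAdvance token_ids onset_id p
    if p1 = token_ids.length then (onsets, offsets)
    else
      let onsets1 := onsets ++ [(p1 : Int)]
      match PySem.List.pyGet? eoff (i : Int) with
      | none => (onsets1, offsets)  -- Python: IndexError; outside Pre_
      | some offset_id =>
        let p2 := pvAdvance token_ids offset_id p1
        if p2 = token_ids.length then (onsets1, offsets)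
        else pvGoB token_ids eoff rest (i + 1) (p2 + 1) onsets1 (offsets ++ [(p2 : Int)])

def convert_indices_alt (token_ids : List Int) (entity_token_onsets : List Int) (entity_token_offsets : List Int) : List Int × List Int :=
  pvGoB token_ids entity_token_offsets entity_token_onsets 0 0 [] []

-- ===== PRECONDITION & SPEC =====
-- Pre_ excludes (a) non-empty token_ids with empty entity_token_onsets, where A raises
-- IndexError immediately, and (b) entity_token_offsets shorter than entity_token_onsets,
-- where A raises IndexError whenever the surplus onset is actually found in token_ids
-- (where it is never found both programs return the same value, but we exclude that
-- shape uniformly since a well-formed call has paired onset/offset lists).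
def Pre_convert_indices (token_ids : List Int) (entity_token_onsets : List Int) (entity_token_offsets : List Int) : Prop :=
  (token_ids = [] ∨ entity_token_onsets ≠ []) ∧
    entity_token_onsets.length ≤ entity_token_offsets.length
instance (token_ids : List Int) (entity_token_onsets : List Int) (entity_token_offsets : List Int) : Decidable (Pre_convert_indices token_ids entity_token_onsets entity_token_offsets) := by unfold Pre_convert_indices; infer_instance

def pvWitness_convert_indices : List Int × List Int × List Int := ([1, 2, 3, 2], [2, 2], [3, 2])

-- When token_ids is non-empty and entity_token_onsets is empty, A raises IndexError on
-- its very first iteration while B returns ([], []).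
def Raises_convert_indices (token_ids : List Int) (entity_token_onsets : List Int) (entity_token_offsets : List Int) : Prop :=
  token_ids ≠ [] ∧ entity_token_onsets = []
instance (token_ids : List Int) (entity_token_onsets : List Int) (entity_token_offsets : List Int) : Decidable (Raises_convert_indices token_ids entity_token_onsets entity_token_offsets) := by unfold Raises_convert_indices; infer_instance
def pvRaiseWitness_convert_indices : List Int × List Int × List Int := ([1], [], [])
def pvRaiseWitnessOut_convert_indices : List Int × List Int := ([], [])

def Spec_convert_indices (token_ids : List Int) (entity_token_onsets : List Int) (entity_token_offsets : List Int) (out : List Int × List Int) : Prop := out = convert_indices_alt token_ids entity_token_onsets entity_token_offsets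
instance (token_ids : List Int) (entity_token_onsets : List Int) (entity_token_offsets : List Int) (out : List Int × List Int) : Decidable (Spec_convert_indices token_ids entity_token_onsets entity_token_offsets out) := by unfold Spec_convert_indices; infer_instance

-- ===== CLAIM (what is proved, stated in full; the proofs are below) =====
def Claim_equal_convert_indices : Prop := ∀ (token_ids : List Int) (entity_token_onsets : List Int) (entity_token_offsets : List Int), Dom_convert_indices token_ids entity_token_onsets entity_token_offsets → Pre_convert_indices token_ids entity_token_onsets entity_token_offsets → Spec_convert_indices token_ids entity_token_onsets entity_token_offsets (convert_indices token_ids entity_token_onsets entity_token_offsets)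

def Claim_raises_convert_indices : Prop := (∀ (token_ids : List Int) (entity_token_onsets : List Int) (entity_token_offsets : List Int), Dom_convert_indices token_ids entity_token_onsets entity_token_offsets → Raises_convert_indices token_ids entity_token_onsets entity_token_offsets → ¬ Pre_convert_indices token_ids entity_token_onsets entity_token_offsets) ∧ (Dom_convert_indices (pvRaiseWitness_convert_indices.1) (pvRaiseWitness_convert_indices.2.1) (pvRaiseWitness_convert_indices.2.2) ∧ Raises_convert_indices (pvRaiseWitness_convert_indices.1) (pvRaiseWitness_convert_indices.2.1) (pvRaiseWitness_convert_indices.2.2) ∧ convert_indices_alt (pvRaiseWitness_convert_indices.1) (pvRaiseWitness_convert_indices.2.1) (pvRaiseWitness_convert_indices.2.2) = pvRaiseWitnessOut_convert_indices)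

-- ===== LEMMAS AND PROOFS =====

-- Proof-only helper: the enumerated suffix of token_ids starting at token index p.
def pvEnumFrom (t : List Int) (p : Nat) : List (Int × Int) :=
  PySem.List.enumerate (t.drop p) (p : Int)

theorem pvEnumFrom_ge (t : List Int) (p : Nat) (h : t.length ≤ p) :
    pvEnumFrom t p = [] := by
  simp [pvEnumFrom, List.drop_eq_nil_of_le h, PySem.List.enumerate_nil]

theorem pvEnumFrom_lt (t : List Int) (p : Nat) (h : p < t.length) :
    pvEnumFrom t p = ((p : Int), t[p]) :: pvEnumFrom t (p + 1) := by
  rw [pvEnumFrom, List.drop_eq_getElem_cons h, PySem.List.enumerate_cons]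
  simp [pvEnumFrom]

theorem pvAdvance_ge (t : List Int) (v : Int) (p : Nat) (h : t.length ≤ p) :
    pvAdvance t v p = p := by
  rw [pvAdvance]; simp [Nat.not_lt_of_le h]

theorem pvAdvance_hit (t : List Int) (v : Int) (p : Nat) (h : p < t.length)
    (hv : t[p] = v) : pvAdvance t v p = p := by
  rw [pvAdvance]; simp [h, hv]

theorem pvAdvance_miss (t : List Int) (v : Int) (p : Nat) (h : p < t.length)
    (hv : t[p] ≠ v) : pvAdvance t v p = pvAdvance t v (p + 1) := by
  rw [pvAdvance]; simp [h, hv]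

theorem pvAdvance_le (t : List Int) (v : Int) (p : Nat) (h : p ≤ t.length) :
    pvAdvance t v p ≤ t.length := by
  fun_induction pvAdvance t v p with
  | case1 p h1 h2 => omega
  | case2 p h1 h2 ih => exact ih (by omega)
  | case3 p h1 => omega

-- Offset phase: A scanning for the entity end equals advancing the pointer.
theorem pvGoA_off (t eon eoff : List Int) (w : Int) (ind : Int)
    (hw : PySem.List.pyGet? eoff ind = some w) (hind : ind < (eon.length : Int)) :
    ∀ q onsets offsets, q ≤ t.length → onsets.length = offsets.length + 1 →
    pvGoA eon eoff (pvEnumFrom t q) onsets offsets ind =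
      (let r := pvAdvance t w q
       if r = t.length then (onsets, offsets)
       else if ind + 1 ≥ (eon.length : Int) then (onsets, offsets ++ [(r : Int)])
       else pvGoA eon eoff (pvEnumFrom t (r + 1)) onsets (offsets ++ [(r : Int)]) (ind + 1)) := by
  intro q
  induction hq : t.length - q using Nat.strong_induction_on generalizing q with
  | _ k ih =>
  intro onsets offsets hqle hlen
  by_cases hlt : q < t.length
  · rw [pvEnumFrom_lt t q hlt]
    by_cases hv : w = t[q]
    · rw [pvAdvance_hit t w q hlt hv.symm]
      by_cases hbr : ind + 1 ≥ (eon.length : Int)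
      · simp [pvGoA, hw, show onsets.length ≠ offsets.length by omega, hv,
          show q ≠ t.length by omega, hbr]
      · simp [pvGoA, hw, show onsets.length ≠ offsets.length by omega, hv,
          show q ≠ t.length by omega, show ¬ (eon.length : Int) ≤ ind + 1 by omega]
    · rw [pvAdvance_miss t w q hlt (Ne.symm hv)]
      have h1 : ¬ onsets.length = offsets.length := by omega
      have h2 : ¬ (ind ≥ (eon.length : Int)) := by omega
      simp only [pvGoA, h1, if_false, hw, Option.map_some, hv, h2, ne_eq,
        not_false_eq_true, if_true]
      exact ih (t.length - (q + 1)) (by omega) (q + 1) rfl onsets offsets (by omega) hlen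
  · have hq' : q = t.length := by omega
    rw [pvEnumFrom_ge t q (by omega), pvAdvance_ge t w q (by omega), hq']
    simp [pvGoA]

-- Balanced phase: one full entity (onset scan then offset scan) of A.
theorem pvGoA_bal (t eon eoff : List Int) (v w : Int) (ind : Int)
    (hv : PySem.List.pyGet? eon ind = some v)
    (hw : PySem.List.pyGet? eoff ind = some w) (hind : ind < (eon.length : Int)) :
    ∀ p onsets offsets, p ≤ t.length → onsets.length = offsets.length →
    pvGoA eon eoff (pvEnumFrom t p) onsets offsets ind =
      (let q := pvAdvance t v p
       if q = t.length then (onsets, offsets)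
       else
         let r := pvAdvance t w q
         if r = t.length then (onsets ++ [(q : Int)], offsets)
         else if ind + 1 ≥ (eon.length : Int) then (onsets ++ [(q : Int)], offsets ++ [(r : Int)])
         else pvGoA eon eoff (pvEnumFrom t (r + 1)) (onsets ++ [(q : Int)]) (offsets ++ [(r : Int)]) (ind + 1)) := by
  intro p
  induction hp : t.length - p using Nat.strong_induction_on generalizing p with
  | _ k ih =>
  intro onsets offsets hple hlen
  by_cases hlt : p < t.length
  · rw [pvEnumFrom_lt t p hlt]
    by_cases hvp : v = t[p]
    · -- onset found at p
      rw [pvAdvance_hit t v p hlt hvp.symm]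
      simp only [pvGoA, hlen, hv, Option.map_some, hvp, if_pos]
      simp only [show (onsets ++ [(p : Int)]).length ≠ offsets.length by simp; omega,
        hw, Option.map_some]
      by_cases hwp : w = t[p]
      · -- offset on the same token
        rw [pvAdvance_hit t w p hlt hwp.symm]
        have h1 : ¬ (onsets.length + 1 = offsets.length) := by omega
        by_cases hbr : (eon.length : Int) ≤ ind + 1
        · simp [hwp, h1, hbr, show p ≠ t.length by omega]
        · simp [hwp, h1, hbr, show p ≠ t.length by omega]
      · rw [pvAdvance_miss t w p hlt (Ne.symm hwp)]
        have h2 : ¬ ((eon.length : Int) ≤ ind) := by omega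
        have hoff := pvGoA_off t eon eoff w ind hw hind (p + 1)
          (onsets ++ [(p : Int)]) offsets (by omega) (by simp [hlen])
        simp only [hwp, if_false, ite_self, h2]
        rw [hoff]
        simp [show p ≠ t.length by omega]
    · -- no onset here: plain step
      rw [pvAdvance_miss t v p hlt (Ne.symm hvp)]
      have h2 : ¬ ((eon.length : Int) ≤ ind) := by omega
      have h3 := ih (t.length - (p + 1)) (by omega) (p + 1) rfl onsets offsets (by omega) hlen
      simp only [pvGoA, hlen, hv, Option.map_some, hvp, if_false, ite_self, h2,
        ne_eq, not_true_eq_false] at h3 ⊢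
      rw [h3]

  · have hp' : p = t.length := by omega
    rw [pvEnumFrom_ge t p (by omega), pvAdvance_ge t v p (by omega), hp']
    simp [pvGoA]

-- Entity-by-entity simulation of A by B.
theorem pvGoA_eq_goB (t eon eoff : List Int) (hlen : eon.length ≤ eoff.length) :
    ∀ i p onsets offsets, i < eon.length → p ≤ t.length →
      onsets.length = offsets.length →
    pvGoA eon eoff (pvEnumFrom t p) onsets offsets (i : Int) =
      pvGoB t eoff (eon.drop i) i p onsets offsets := by
  intro i
  induction hm : eon.length - i using Nat.strong_induction_on generalizing i with
  | _ k ih =>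
  intro p onsets offsets hi hple hbal
  have hv : PySem.List.pyGet? eon (i : Int) = some eon[i] := by
    simp [PySem.List.pyGet?_natCast, List.getElem?_eq_getElem hi]
  have hi' : i < eoff.length := by omega
  have hw : PySem.List.pyGet? eoff (i : Int) = some eoff[i] := by
    simp [PySem.List.pyGet?_natCast, List.getElem?_eq_getElem hi']
  rw [pvGoA_bal t eon eoff eon[i] eoff[i] (i : Int) hv hw (by exact_mod_cast hi)
      p onsets offsets hple hbal]
  rw [List.drop_eq_getElem_cons hi]
  simp only [pvGoB, hw]
  set q := pvAdvance t eon[i] p with hq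
  have hqle : q ≤ t.length := pvAdvance_le t eon[i] p hple
  by_cases hqn : q = t.length
  · simp [hqn]
  · simp only [hqn, if_neg, if_false]
    set r := pvAdvance t eoff[i] q with hr
    have hrle : r ≤ t.length := pvAdvance_le t eoff[i] q hqle
    by_cases hrn : r = t.length
    · simp [hrn]
    · simp only [hrn, if_neg, if_false]
      by_cases hbr : i + 1 ≥ eon.length
      · have hdrop : eon.drop (i + 1) = [] := List.drop_eq_nil_of_le hbr
        have : ((i : Int) + 1 ≥ (eon.length : Int)) := by exact_mod_cast hbr
        simp [this, hdrop, pvGoB]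
      · have : ¬ ((i : Int) + 1 ≥ (eon.length : Int)) := by
          push_cast; omega
        simp only [this, if_neg, if_false]
        have := ih (eon.length - (i + 1)) (by omega) (i + 1) rfl (r + 1)
          (onsets ++ [(q : Int)]) (offsets ++ [(r : Int)]) (by omega) (by omega)
          (by simp [hbal])
        rw [show ((i : Int) + 1) = ((i + 1 : Nat) : Int) by push_cast; ring]
        exact this

-- ===== VERDICT (by name: the statement is the Claim_ definition above) =====
theorem convert_indices_spec : Claim_equal_convert_indices := by
  intro t eon eoff _ hpre
  unfold Spec_convert_indices convert_indices convert_indices_alt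
  obtain ⟨hne, hlen⟩ := hpre
  by_cases heon : eon = []
  · subst heon
    have ht : t = [] := by
      rcases hne with h | h
      · exact h
      · exact absurd rfl h
    subst ht
    simp [pvGoA, pvGoB, PySem.List.enumerate_nil]
  · rw [show PySem.List.enumerate t 0 = pvEnumFrom t 0 by simp [pvEnumFrom]]
    rw [show (0 : Int) = ((0 : Nat) : Int) by norm_num]
    rw [pvGoA_eq_goB t eon eoff hlen 0 0 [] []
      (List.length_pos_of_ne_nil heon) (by omega) rfl]
    simp

@[simp] theorem convert_indices_raises : Claim_raises_convert_indices := by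
  unfold Claim_raises_convert_indices
  constructor
  · intro t eon eoff _ ⟨ht, heon⟩ ⟨hp, _⟩
    rcases hp with h | h
    · exact ht h
    · exact h heon
  · exact ⟨by decide, by decide, by decide⟩
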